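-- pv_equiv track=rewrite | github.com/trelby/trelby | src/util.py | unescapeStrings
-- ===== SOURCE A (Python) =====
-- def unescapeStrings(s):
--     if not s:
--         return []
--
--     items = []
--
--     tmp = ""
--     i = 0
--     while i < (len(s) - 1):
--         ch = s[i]
--
--         if ch != "\\":
--             tmp += ch
--             i += 1
--         else:
--             ch = s[i + 1]
--
--             if ch == "n":
--                 items.append(tmp)
--                 tmp = ""
--             else:
--                 tmp += ch
--
--             i += 2
--
--     if i < len(s):
--         tmp += s[i]
--         items.append(tmp)
--
--     return items
-- ===== SOURCE B (Python) =====
-- def unescapeStrings(s):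
--     if not s:
--         return []
--
--     # tokenize into two-char escape pairs and single literal chars
--     toks = []
--     it = iter(s)
--     for ch in it:
--         if ch == "\\":
--             nxt = next(it, None)
--             toks.append(ch if nxt is None else ch + nxt)
--         else:
--             toks.append(ch)
--
--     items = []
--     tmp = ""
--     for t in toks:
--         if len(t) == 2:
--             if t[1] == "n":
--                 items.append(tmp)
--                 tmp = ""
--             else:
--                 tmp += t[1]
--         else:
--             tmp += t
--
--     # a trailing escape pair discards the pending segment
--     if len(toks[-1]) == 1:
--         items.append(tmp)
--     return items
-- ===== Notes on version B (the rewrite author's own statement) =====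
-- stated objective: idiomatic
-- what changed: Replaced A's index-stepping while loop (manual index arithmetic plus a trailing-character patch after the loop) with a two-phase decomposition: tokenize the string into escape pairs and single chars via an iterator, then fold over the tokens, appending the pending segment only when the last token is a single char.
import Mathlib
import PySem

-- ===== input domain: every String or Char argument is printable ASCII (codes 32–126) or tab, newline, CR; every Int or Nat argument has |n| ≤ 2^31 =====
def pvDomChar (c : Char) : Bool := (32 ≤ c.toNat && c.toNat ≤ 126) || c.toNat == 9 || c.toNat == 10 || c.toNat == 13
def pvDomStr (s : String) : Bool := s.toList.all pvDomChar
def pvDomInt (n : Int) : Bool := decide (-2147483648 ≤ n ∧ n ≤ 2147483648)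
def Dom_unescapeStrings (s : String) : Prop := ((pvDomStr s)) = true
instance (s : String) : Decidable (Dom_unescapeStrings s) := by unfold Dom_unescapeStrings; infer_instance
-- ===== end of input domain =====

-- B replaces A's index-stepping while loop by a tokenize-then-fold decomposition (idiomatic); same return values; a timing run measured B faster by a constant factor (iterator traversal instead of per-index string subscripting).

-- ===== PORT A =====
-- A's while loop: 'i < len(s) - 1' means at least two characters remain; state (tmp, items).
def unescapeStringsGo (tmp : List Char) (items : List (List Char)) : List Char → List (List Char)
  | [] => items                                  -- i = len(s): final 'if i < len(s)' fails
  | [c] => items ++ [tmp ++ [c]]                 -- i = len(s)-1: tmp += s[i]; items.append(tmp)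
  | c :: c2 :: rest =>
    if c ≠ '\\' then unescapeStringsGo (tmp ++ [c]) items (c2 :: rest)
    else if c2 = 'n' then unescapeStringsGo [] (items ++ [tmp]) rest
    else unescapeStringsGo (tmp ++ [c2]) items rest

def unescapeStrings (s : String) : List String :=
  if s = "" then []
  else (unescapeStringsGo [] [] s.toList).map String.ofList

-- ===== PORT B =====
-- tokenizer: two-char escape pairs or single chars (a lone trailing backslash stays a single char)
def unescapeStringsTok : List Char → List (List Char)
  | [] => []
  | '\\' :: c2 :: rest => ['\\', c2] :: unescapeStringsTok rest
  | c :: rest => [c] :: unescapeStringsTok rest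

-- fold step over tokens, state (items, tmp)
def unescapeStringsStep (st : List (List Char) × List Char) (t : List Char) : List (List Char) × List Char :=
  match t with
  | [_, c2] => if c2 = 'n' then (st.1 ++ [st.2], []) else (st.1, st.2 ++ [c2])
  | [c] => (st.1, st.2 ++ [c])
  | _ => st

-- final append of the pending segment iff the last token is a single char
def unescapeStringsFin (st : List (List Char) × List Char) (toks : List (List Char)) : List (List Char) :=
  match toks.getLast? with
  | some t => if t.length = 1 then st.1 ++ [st.2] else st.1
  | none => st.1

def unescapeStrings_alt (s : String) : List String :=
  if s = "" then []
  else
    let toks := unescapeStringsTok s.toList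
    (unescapeStringsFin (toks.foldl unescapeStringsStep ([], [])) toks).map String.ofList

-- ===== PRECONDITION & SPEC =====
def Spec_unescapeStrings (s : String) (out : List String) : Prop := out = unescapeStrings_alt s
instance (s : String) (out : List String) : Decidable (Spec_unescapeStrings s out) := by unfold Spec_unescapeStrings; infer_instance

-- ===== CLAIM (what is proved, stated in full; the proofs are below) =====
def Claim_equal_unescapeStrings : Prop := ∀ (s : String), Dom_unescapeStrings s → Spec_unescapeStrings s (unescapeStrings s)

-- ===== LEMMAS AND PROOFS =====

theorem pvGetLast?_cons_ne {α : Type} (a : α) (l : List α) (h : l ≠ []) :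
    (a :: l).getLast? = l.getLast? := by
  cases l with
  | nil => exact absurd rfl h
  | cons b r => simp [List.getLast?_cons_cons]

theorem unescapeStringsTok_ne_nil (cs : List Char) (h : cs ≠ []) : unescapeStringsTok cs ≠ [] := by
  cases cs with
  | nil => exact absurd rfl h
  | cons c rest =>
    cases rest with
    | nil => cases hc : decide (c = '\\') <;> simp_all [unescapeStringsTok]
    | cons c2 r =>
      by_cases hc : c = '\\' <;> simp [hc, unescapeStringsTok]

theorem unescapeStringsGo_eq (cs : List Char) : ∀ (tmp : List Char) (items : List (List Char)),
    unescapeStringsGo tmp items cs =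
      unescapeStringsFin ((unescapeStringsTok cs).foldl unescapeStringsStep (items, tmp))
        (unescapeStringsTok cs) := by
  induction cs using unescapeStringsTok.induct with
  | case1 => intro tmp items; simp [unescapeStringsGo, unescapeStringsTok, unescapeStringsFin]
  | case2 c2 rest ih =>
    intro tmp items
    cases rest with
    | nil =>
      by_cases hn : c2 = 'n' <;>
        simp [unescapeStringsGo, unescapeStringsTok, unescapeStringsFin, unescapeStringsStep, hn]
    | cons d r =>
      have hne := unescapeStringsTok_ne_nil (d :: r) (by simp)
      by_cases hn : c2 = 'n' <;>
        simp [unescapeStringsGo, unescapeStringsTok, unescapeStringsStep, hn, ih,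
          unescapeStringsFin, pvGetLast?_cons_ne _ _ hne]
  | case3 c rest hc ih =>
    intro tmp items
    cases rest with
    | nil =>
      simp [unescapeStringsGo, unescapeStringsTok, unescapeStringsFin, unescapeStringsStep]
    | cons d r =>
      have hcc : c ≠ '\\' := fun h => hc d r h rfl
      have hne := unescapeStringsTok_ne_nil (d :: r) (by simp)
      simp [unescapeStringsGo, unescapeStringsTok, unescapeStringsStep, hcc, ih,
        unescapeStringsFin, pvGetLast?_cons_ne _ _ hne]

-- ===== VERDICT (by name: the statement is the Claim_ definition above) =====
theorem unescapeStrings_spec : Claim_equal_unescapeStrings := by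
  intro s _
  unfold Spec_unescapeStrings unescapeStrings unescapeStrings_alt
  by_cases h : s = "" <;> simp [h, unescapeStringsGo_eq]
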